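-- pv_equiv track=rewrite | github.com/kazakhan/GroupFaceRecognition | schoolphotoID/gui/worker.py | sort_faces_rowwise
-- ===== SOURCE A (Python) =====
-- def sort_faces_rowwise(faces_with_people, row_threshold=40):
--     faces_with_center = [
--         (box, person, (box[0] + box[2]) // 2)
--         for box, person in faces_with_people
--     ]
--
--     faces_with_center.sort(key=lambda x: x[2])
--
--     rows = []
--     current_row = []
--     last_center_y = None
--
--     for box, person, center_y in faces_with_center:
--         if not current_row:
--             current_row.append((box, person))
--             last_center_y = center_y
--             continue
--
--         if abs(center_y - last_center_y) <= row_threshold: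
--             current_row.append((box, person))
--         else:
--             current_row.sort(key=lambda x: x[0][3])
--             rows.append(current_row)
--             current_row = [(box, person)]
--         last_center_y = center_y
--
--     if current_row:
--         current_row.sort(key=lambda x: x[0][3])
--         rows.append(current_row)
--
--     sorted_faces = [fp for row in rows for fp in row]
--     return sorted_faces
-- ===== SOURCE B (Python) =====
-- def sort_faces_rowwise(faces_with_people, row_threshold=40):
--     ordered = sorted(faces_with_people, key=lambda fp: (fp[0][0] + fp[0][2]) // 2)
--     keyed = []
--     row_id = 0
--     prev = None
--     for box, person in ordered:
--         c = (box[0] + box[2]) // 2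
--         if prev is not None and abs(c - prev) > row_threshold:
--             row_id += 1
--         keyed.append(((row_id, box[3]), (box, person)))
--         prev = c
--     keyed.sort(key=lambda kv: kv[0])
--     return [fp for _, fp in keyed]
-- ===== Notes on version B (the rewrite author's own statement) =====
-- stated objective: alternative
-- what changed: B replaces A's stateful row accumulation (current_row/rows lists with per-row sorts at each break) by a single pass that tags each face with a (row_id, bottom-y) key and one global stable sort on that composite key.
import Mathlib
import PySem

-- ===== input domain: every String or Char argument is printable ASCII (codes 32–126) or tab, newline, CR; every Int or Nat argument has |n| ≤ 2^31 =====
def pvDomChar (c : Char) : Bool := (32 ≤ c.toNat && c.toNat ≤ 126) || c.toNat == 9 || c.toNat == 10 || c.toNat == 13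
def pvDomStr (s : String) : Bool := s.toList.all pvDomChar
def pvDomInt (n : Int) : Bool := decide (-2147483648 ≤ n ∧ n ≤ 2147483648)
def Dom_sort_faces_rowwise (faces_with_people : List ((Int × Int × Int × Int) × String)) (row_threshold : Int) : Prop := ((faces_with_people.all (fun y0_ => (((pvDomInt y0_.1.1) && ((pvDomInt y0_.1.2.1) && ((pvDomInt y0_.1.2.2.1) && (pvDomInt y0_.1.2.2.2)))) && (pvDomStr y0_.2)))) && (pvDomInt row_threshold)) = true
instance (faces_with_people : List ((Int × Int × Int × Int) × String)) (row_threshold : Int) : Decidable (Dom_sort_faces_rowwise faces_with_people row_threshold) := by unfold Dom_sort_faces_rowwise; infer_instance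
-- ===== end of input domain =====

-- B replaces A's stateful row accumulation with per-row sorts by a one-pass (row_id, bottom-y)
-- keying followed by a single global stable sort on that composite key (objective: alternative).

-- ===== PORT A =====
-- A's loop state: (rows, current_row, last_center_y)
def sort_faces_rowwise (faces_with_people : List ((Int × Int × Int × Int) × String)) (row_threshold : Int) : List ((Int × Int × Int × Int) × String) :=
  let faces_with_center := faces_with_people.map
    (fun fp => (fp.1, fp.2, PySem.Int.floordiv (fp.1.1 + fp.1.2.2.1) 2))
  let faces_with_center := PySem.List.sorted faces_with_center (fun x => x.2.2) false
  let st := faces_with_center.foldl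
    (fun (st : List (List ((Int × Int × Int × Int) × String)) × List ((Int × Int × Int × Int) × String) × Option Int)
         (x : (Int × Int × Int × Int) × String × Int) =>
      if st.2.1.isEmpty then (st.1, [(x.1, x.2.1)], some x.2.2)
      else if |x.2.2 - (st.2.2.getD 0)| ≤ row_threshold then
        (st.1, st.2.1 ++ [(x.1, x.2.1)], some x.2.2)
      else
        (st.1 ++ [PySem.List.sorted st.2.1 (fun y => y.1.2.2.2) false], [(x.1, x.2.1)], some x.2.2))
    ([], [], none)
  let rows := if st.2.1.isEmpty then st.1
              else st.1 ++ [PySem.List.sorted st.2.1 (fun y => y.1.2.2.2) false]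
  rows.flatten

-- ===== PORT B =====
-- one pass assigns each face a key (row_id, box[3]); one global stable sort by that key
def sort_faces_rowwise_alt (faces_with_people : List ((Int × Int × Int × Int) × String)) (row_threshold : Int) : List ((Int × Int × Int × Int) × String) :=
  let ordered := PySem.List.sorted faces_with_people
    (fun fp => PySem.Int.floordiv (fp.1.1 + fp.1.2.2.1) 2) false
  let st := ordered.foldl
    (fun (st : List ((Int × Int) × ((Int × Int × Int × Int) × String)) × Int × Option Int)
         (fp : (Int × Int × Int × Int) × String) =>
      let c := PySem.Int.floordiv (fp.1.1 + fp.1.2.2.1) 2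
      let rid := match st.2.2 with
        | some p => if row_threshold < |c - p| then st.2.1 + 1 else st.2.1
        | none => st.2.1
      (st.1 ++ [((rid, fp.1.2.2.2), fp)], rid, some c))
    ([], 0, none)
  let keyed := PySem.List.sorted2 st.1 (fun kv => kv.1.1) (fun kv => kv.1.2) false
  keyed.map (fun kv => kv.2)

-- ===== PRECONDITION & SPEC =====
def Spec_sort_faces_rowwise (faces_with_people : List ((Int × Int × Int × Int) × String)) (row_threshold : Int) (out : List ((Int × Int × Int × Int) × String)) : Prop := out = sort_faces_rowwise_alt faces_with_people row_threshold
instance (faces_with_people : List ((Int × Int × Int × Int) × String)) (row_threshold : Int) (out : List ((Int × Int × Int × Int) × String)) : Decidable (Spec_sort_faces_rowwise faces_with_people row_threshold out) := by unfold Spec_sort_faces_rowwise; infer_instance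

-- ===== CLAIM (what is proved, stated in full; the proofs are below) =====
def Claim_equal_sort_faces_rowwise : Prop := ∀ (faces_with_people : List ((Int × Int × Int × Int) × String)) (row_threshold : Int), Dom_sort_faces_rowwise faces_with_people row_threshold → Spec_sort_faces_rowwise faces_with_people row_threshold (sort_faces_rowwise faces_with_people row_threshold)

-- ===== LEMMAS AND PROOFS =====

-- ----- proof-side helper definitions -----
abbrev pvFace : Type := (Int × Int × Int × Int) × String

def pvC (fp : pvFace) : Int := PySem.Int.floordiv (fp.1.1 + fp.1.2.2.1) 2

def pvSortRow (r : List pvFace) : List pvFace := PySem.List.sorted r (fun y => y.1.2.2.2) false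

def pvStepA (t : Int) (st : List (List pvFace) × List pvFace × Option Int) (fp : pvFace) :
    List (List pvFace) × List pvFace × Option Int :=
  if st.2.1.isEmpty then (st.1, [fp], some (pvC fp))
  else if |pvC fp - st.2.2.getD 0| ≤ t then (st.1, st.2.1 ++ [fp], some (pvC fp))
  else (st.1 ++ [pvSortRow st.2.1], [fp], some (pvC fp))

def pvFin (st : List (List pvFace) × List pvFace × Option Int) : List (List pvFace) :=
  if st.2.1.isEmpty then st.1 else st.1 ++ [pvSortRow st.2.1]

def pvGo (t : Int) (cur : List pvFace) (last : Int) : List pvFace → List (List pvFace)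
  | [] => [cur]
  | x :: xs => if |pvC x - last| ≤ t then pvGo t (cur ++ [x]) (pvC x) xs
               else cur :: pvGo t [x] (pvC x) xs

def pvChunks (t : Int) : List pvFace → List (List pvFace)
  | [] => []
  | x :: xs => pvGo t [x] (pvC x) xs

def pvStepB (t : Int) (st : List ((Int × Int) × pvFace) × Int × Option Int) (fp : pvFace) :
    List ((Int × Int) × pvFace) × Int × Option Int :=
  let rid := match st.2.2 with
    | some p => if t < |pvC fp - p| then st.2.1 + 1 else st.2.1
    | none => st.2.1
  (st.1 ++ [((rid, fp.1.2.2.2), fp)], rid, some (pvC fp))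

def pvTagWith (t rid last : Int) : List pvFace → List ((Int × Int) × pvFace)
  | [] => []
  | x :: xs => if t < |pvC x - last| then ((rid + 1, x.1.2.2.2), x) :: pvTagWith t (rid + 1) (pvC x) xs
               else ((rid, x.1.2.2.2), x) :: pvTagWith t rid (pvC x) xs

def pvTagRow (rid : Int) (r : List pvFace) : List ((Int × Int) × pvFace) :=
  r.map (fun fp => ((rid, fp.1.2.2.2), fp))

def pvTagChunks (rid : Int) : List (List pvFace) → List ((Int × Int) × pvFace)
  | [] => []
  | r :: rs => pvTagRow rid r ++ pvTagChunks (rid + 1) rs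

-- ----- generic facts about PySem's stable insertion sort -----
theorem pvInsertBy_map {α β : Type} (g : α → β) (b : β → β → Bool) (x : α) (ys : List α) :
    PySem.List.insertBy b (g x) (ys.map g) =
      (PySem.List.insertBy (fun a c => b (g a) (g c)) x ys).map g := by
  induction ys with
  | nil => simp [PySem.List.insertBy]
  | cons y ys ih =>
    simp only [List.map_cons, PySem.List.insertBy]
    by_cases h : b (g x) (g y) = true <;> simp [h, ih]

theorem pvFoldl_insertBy_map {α β : Type} (g : α → β) (b : β → β → Bool) (xs : List α) :
    ∀ acc : List α,
      (xs.map g).foldl (fun acc x => PySem.List.insertBy b x acc) (acc.map g) =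
        (xs.foldl (fun acc x => PySem.List.insertBy (fun a c => b (g a) (g c)) x acc) acc).map g := by
  induction xs with
  | nil => intro acc; simp
  | cons x xs ih =>
    intro acc
    simp only [List.map_cons, List.foldl_cons]
    rw [pvInsertBy_map g b x acc]
    exact ih _

theorem pvSorted_map {α β : Type} (g : α → β) (k : β → Int) (xs : List α) :
    PySem.List.sorted (xs.map g) k false = (PySem.List.sorted xs (fun a => k (g a)) false).map g := by
  rw [PySem.List.sorted_eq_foldl_insertBy, PySem.List.sorted_eq_foldl_insertBy]
  have := pvFoldl_insertBy_map g (fun a c => decide (k a < k c)) xs []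
  simpa using this

theorem pvInsertBy_congr {α : Type} (b₁ b₂ : α → α → Bool) (x : α) (ys : List α)
    (h : ∀ y ∈ ys, b₁ x y = b₂ x y) :
    PySem.List.insertBy b₁ x ys = PySem.List.insertBy b₂ x ys := by
  induction ys with
  | nil => rfl
  | cons y ys ih =>
    simp only [PySem.List.insertBy]
    rw [h y (List.mem_cons_self)]
    by_cases hb : b₂ x y = true
    · simp [hb]
    · simp [hb, ih (fun z hz => h z (List.mem_cons_of_mem _ hz))]

theorem pvFoldl_insertBy_congr {α : Type} (b₁ b₂ : α → α → Bool) (P : α → Prop)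
    (hb : ∀ x y, P x → P y → b₁ x y = b₂ x y) (l : List α) :
    ∀ acc : List α, (∀ x ∈ l, P x) → (∀ y ∈ acc, P y) →
      l.foldl (fun acc x => PySem.List.insertBy b₁ x acc) acc =
        l.foldl (fun acc x => PySem.List.insertBy b₂ x acc) acc := by
  induction l with
  | nil => intro acc _ _; rfl
  | cons x l ih =>
    intro acc hl hacc
    simp only [List.foldl_cons]
    have hx : P x := hl x List.mem_cons_self
    rw [pvInsertBy_congr b₁ b₂ x acc (fun y hy => hb x y hx (hacc y hy))]
    refine ih _ (fun z hz => hl z (List.mem_cons_of_mem _ hz)) ?_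
    intro y hy
    rcases (PySem.List.mem_insertBy b₂ x y acc).1 hy with h | h
    · exact h ▸ hx
    · exact hacc y h

theorem pvInsertBy_append_left {α : Type} (b : α → α → Bool) (x : α) (S acc : List α)
    (h : ∀ y ∈ S, b x y = false) :
    PySem.List.insertBy b x (S ++ acc) = S ++ PySem.List.insertBy b x acc := by
  induction S with
  | nil => rfl
  | cons y S ih =>
    simp only [List.cons_append, PySem.List.insertBy, h y List.mem_cons_self]
    simp only [Bool.false_eq_true, if_false, List.cons.injEq, true_and]
    exact ih (fun z hz => h z (List.mem_cons_of_mem _ hz))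

theorem pvFoldl_insertBy_append {α : Type} (b : α → α → Bool) (S : List α) (l : List α)
    (h : ∀ x ∈ l, ∀ y ∈ S, b x y = false) :
    ∀ acc : List α,
      l.foldl (fun a x => PySem.List.insertBy b x a) (S ++ acc) =
        S ++ l.foldl (fun a x => PySem.List.insertBy b x a) acc := by
  induction l with
  | nil => intro acc; rfl
  | cons x l ih =>
    intro acc
    simp only [List.foldl_cons]
    rw [pvInsertBy_append_left b x S acc (h x List.mem_cons_self)]
    exact ih (fun z hz => h z (List.mem_cons_of_mem _ hz)) _

-- lexicographic comparison used by sorted2, as a named function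
def pvLex (k1 k2 : (Int × Int) × pvFace → Int) (a c : (Int × Int) × pvFace) : Bool :=
  decide (k1 a < k1 c) || (!decide (k1 c < k1 a) && decide (k2 a < k2 c))

theorem pvSorted2_eq_foldl (l : List ((Int × Int) × pvFace)) :
    PySem.List.sorted2 l (fun kv => kv.1.1) (fun kv => kv.1.2) false =
      l.foldl (fun acc x => PySem.List.insertBy (pvLex (fun kv => kv.1.1) (fun kv => kv.1.2)) x acc) [] := by
  rfl

theorem pvSorted2_append (l1 l2 : List ((Int × Int) × pvFace))
    (h : ∀ a ∈ l1, ∀ c ∈ l2, a.1.1 < c.1.1) :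
    PySem.List.sorted2 (l1 ++ l2) (fun kv => kv.1.1) (fun kv => kv.1.2) false =
      PySem.List.sorted2 l1 (fun kv => kv.1.1) (fun kv => kv.1.2) false ++
        PySem.List.sorted2 l2 (fun kv => kv.1.1) (fun kv => kv.1.2) false := by
  rw [pvSorted2_eq_foldl, pvSorted2_eq_foldl, pvSorted2_eq_foldl, List.foldl_append]
  set S := l1.foldl (fun acc x => PySem.List.insertBy (pvLex (fun kv => kv.1.1) (fun kv => kv.1.2)) x acc) [] with hS
  have hmemS : ∀ y ∈ S, y ∈ l1 := by
    intro y hy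
    have hperm := PySem.List.sorted2_perm l1 (fun kv : (Int × Int) × pvFace => kv.1.1)
      (fun kv : (Int × Int) × pvFace => kv.1.2) false
    rw [pvSorted2_eq_foldl] at hperm
    exact hperm.mem_iff.1 (hS ▸ hy)
  have hfalse : ∀ x ∈ l2, ∀ y ∈ S, pvLex (fun kv => kv.1.1) (fun kv => kv.1.2) x y = false := by
    intro x hx y hy
    have hlt : y.1.1 < x.1.1 := h y (hmemS y hy) x hx
    simp only [pvLex, Bool.or_eq_false_iff, Bool.and_eq_false_iff, decide_eq_false_iff_not, not_lt,
      Bool.not_eq_false', decide_eq_true_iff]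
    exact ⟨le_of_lt hlt, Or.inl hlt⟩
  calc l2.foldl (fun acc x => PySem.List.insertBy (pvLex (fun kv => kv.1.1) (fun kv => kv.1.2)) x acc) S
      = l2.foldl (fun acc x => PySem.List.insertBy (pvLex (fun kv => kv.1.1) (fun kv => kv.1.2)) x acc) (S ++ []) := by simp
    _ = S ++ l2.foldl (fun acc x => PySem.List.insertBy (pvLex (fun kv => kv.1.1) (fun kv => kv.1.2)) x acc) [] :=
        pvFoldl_insertBy_append _ S l2 hfalse []


theorem pvSorted2_tagRow (rid : Int) (r : List pvFace) :
    PySem.List.sorted2 (pvTagRow rid r) (fun kv => kv.1.1) (fun kv => kv.1.2) false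
      = pvTagRow rid (pvSortRow r) := by
  rw [pvSorted2_eq_foldl]
  have h1 : (pvTagRow rid r).foldl
        (fun acc x => PySem.List.insertBy (pvLex (fun kv => kv.1.1) (fun kv => kv.1.2)) x acc) []
      = (pvTagRow rid r).foldl
        (fun acc x => PySem.List.insertBy
          (fun a c : (Int × Int) × pvFace => decide (a.1.2 < c.1.2)) x acc) [] := by
    refine pvFoldl_insertBy_congr _ _ (fun kv => kv.1.1 = rid) ?_ _ [] ?_ (by simp)
    · intro x y hx hy
      simp [pvLex, hx, hy]
    · intro x hx; rcases List.mem_map.1 hx with ⟨fp, _, rfl⟩; rfl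
  rw [h1, ← PySem.List.sorted_eq_foldl_insertBy (pvTagRow rid r)
    (fun kv : (Int × Int) × pvFace => kv.1.2)]
  unfold pvTagRow
  rw [pvSorted_map (fun fp : pvFace => ((rid, fp.1.2.2.2), fp))
    (fun kv : (Int × Int) × pvFace => kv.1.2) r]
  rfl

theorem pvTagChunks_fst_le (chs : List (List pvFace)) :
    ∀ (rid : Int), ∀ kv ∈ pvTagChunks rid chs, rid ≤ kv.1.1 := by
  induction chs with
  | nil => intro rid kv h; simp [pvTagChunks] at h
  | cons r rs ih =>
    intro rid kv h
    rcases List.mem_append.1 h with h | h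
    · rcases List.mem_map.1 h with ⟨fp, _, rfl⟩; simp
    · have := ih (rid + 1) kv h; omega

theorem pvSorted2_tagChunks (chs : List (List pvFace)) : ∀ rid : Int,
    (PySem.List.sorted2 (pvTagChunks rid chs) (fun kv => kv.1.1) (fun kv => kv.1.2) false).map
        (fun kv => kv.2)
      = (chs.map pvSortRow).flatten := by
  induction chs with
  | nil => intro rid; rfl
  | cons r rs ih =>
    intro rid
    show (PySem.List.sorted2 (pvTagRow rid r ++ pvTagChunks (rid + 1) rs)
        (fun kv => kv.1.1) (fun kv => kv.1.2) false).map (fun kv => kv.2) = _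
    rw [pvSorted2_append _ _ (by
      intro a ha c hc
      rcases List.mem_map.1 ha with ⟨fp, _, rfl⟩
      have := pvTagChunks_fst_le rs (rid + 1) c hc
      simp only []
      omega)]
    rw [List.map_append, pvSorted2_tagRow, ih (rid + 1)]
    simp [pvTagRow, List.map_map, pvSortRow]
    exact List.map_id _

theorem pvTagWith_go (t : Int) (xs : List pvFace) : ∀ (cur : List pvFace) (last rid : Int),
    pvTagRow rid cur ++ pvTagWith t rid last xs = pvTagChunks rid (pvGo t cur last xs) := by
  induction xs with
  | nil => intro cur last rid; simp [pvTagWith, pvGo, pvTagChunks]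
  | cons x xs ih =>
    intro cur last rid
    by_cases h : |pvC x - last| ≤ t
    · have h' : ¬ t < |pvC x - last| := not_lt.mpr h
      rw [show pvGo t cur last (x :: xs) = pvGo t (cur ++ [x]) (pvC x) xs from by simp [pvGo, h]]
      rw [show pvTagWith t rid last (x :: xs)
          = ((rid, x.1.2.2.2), x) :: pvTagWith t rid (pvC x) xs from by simp [pvTagWith, h']]
      rw [← ih (cur ++ [x]) (pvC x) rid]
      simp [pvTagRow]
    · have h' : t < |pvC x - last| := not_le.mp h
      rw [show pvGo t cur last (x :: xs) = cur :: pvGo t [x] (pvC x) xs from by simp [pvGo, h]]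
      rw [show pvTagWith t rid last (x :: xs)
          = ((rid + 1, x.1.2.2.2), x) :: pvTagWith t (rid + 1) (pvC x) xs from by simp [pvTagWith, h']]
      show pvTagRow rid cur ++ _ = pvTagRow rid cur ++ pvTagChunks (rid + 1) (pvGo t [x] (pvC x) xs)
      rw [← ih [x] (pvC x) (rid + 1)]
      simp [pvTagRow]

theorem pvFoldA (t : Int) (xs : List pvFace) :
    ∀ (rows : List (List pvFace)) (cur : List pvFace) (last : Int), cur ≠ [] →
      pvFin (xs.foldl (pvStepA t) (rows, cur, some last)) = rows ++ (pvGo t cur last xs).map pvSortRow := by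
  induction xs with
  | nil =>
    intro rows cur last hc
    simp [pvFin, pvGo, List.isEmpty_iff, hc]
  | cons x xs ih =>
    intro rows cur last hc
    have hne : cur.isEmpty = false := by simp [hc]
    rw [List.foldl_cons]
    by_cases h : |pvC x - last| ≤ t
    · rw [show pvStepA t (rows, cur, some last) x = (rows, cur ++ [x], some (pvC x)) from by
        simp [pvStepA, hne, h]]
      rw [ih rows (cur ++ [x]) (pvC x) (by simp)]
      rw [show pvGo t cur last (x :: xs) = pvGo t (cur ++ [x]) (pvC x) xs from by simp [pvGo, h]]
    · rw [show pvStepA t (rows, cur, some last) x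
          = (rows ++ [pvSortRow cur], [x], some (pvC x)) from by simp [pvStepA, hne, h]]
      rw [ih _ [x] (pvC x) (by simp)]
      rw [show pvGo t cur last (x :: xs) = cur :: pvGo t [x] (pvC x) xs from by simp [pvGo, h]]
      simp

theorem pvFoldB (t : Int) (xs : List pvFace) : ∀ (acc : List ((Int × Int) × pvFace)) (rid last : Int),
    (xs.foldl (pvStepB t) (acc, rid, some last)).1 = acc ++ pvTagWith t rid last xs := by
  induction xs with
  | nil => intro acc rid last; simp [pvTagWith]
  | cons x xs ih =>
    intro acc rid last
    rw [List.foldl_cons]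
    by_cases h : t < |pvC x - last|
    · rw [show pvStepB t (acc, rid, some last) x
          = (acc ++ [((rid + 1, x.1.2.2.2), x)], rid + 1, some (pvC x)) from by simp [pvStepB, h]]
      rw [ih, show pvTagWith t rid last (x :: xs)
          = ((rid + 1, x.1.2.2.2), x) :: pvTagWith t (rid + 1) (pvC x) xs from by simp [pvTagWith, h]]
      simp
    · rw [show pvStepB t (acc, rid, some last) x
          = (acc ++ [((rid, x.1.2.2.2), x)], rid, some (pvC x)) from by simp [pvStepB, h]]
      rw [ih, show pvTagWith t rid last (x :: xs)
          = ((rid, x.1.2.2.2), x) :: pvTagWith t rid (pvC x) xs from by simp [pvTagWith, h]]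
      simp

theorem pvA_eq (faces : List pvFace) (t : Int) :
    sort_faces_rowwise faces t
      = ((pvChunks t (PySem.List.sorted faces pvC false)).map pvSortRow).flatten := by
  have hsm' : PySem.List.sorted
        (faces.map (fun fp : pvFace => (fp.1, fp.2, PySem.Int.floordiv (fp.1.1 + fp.1.2.2.1) 2)))
        (fun x => x.2.2) false
      = (PySem.List.sorted faces pvC false).map
          (fun fp : pvFace => (fp.1, fp.2, PySem.Int.floordiv (fp.1.1 + fp.1.2.2.1) 2)) :=
    pvSorted_map _ _ faces
  unfold sort_faces_rowwise
  simp only [hsm', List.foldl_map]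
  show (pvFin ((PySem.List.sorted faces pvC false).foldl (pvStepA t) ([], [], none))).flatten = _
  cases hl : PySem.List.sorted faces pvC false with
  | nil => rfl
  | cons x xs =>
    rw [List.foldl_cons,
      show pvStepA t ([], [], none) x = (([] : List (List pvFace)), [x], some (pvC x)) from rfl,
      pvFoldA t xs [] [x] (pvC x) (by simp)]
    simp [pvChunks]

theorem pvB_eq (faces : List pvFace) (t : Int) :
    sort_faces_rowwise_alt faces t
      = ((pvChunks t (PySem.List.sorted faces pvC false)).map pvSortRow).flatten := by
  unfold sort_faces_rowwise_alt
  show (PySem.List.sorted2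
      ((PySem.List.sorted faces pvC false).foldl (pvStepB t) ([], 0, none)).1
      (fun kv => kv.1.1) (fun kv => kv.1.2) false).map (fun kv => kv.2) = _
  cases hl : PySem.List.sorted faces pvC false with
  | nil => rfl
  | cons x xs =>
    rw [List.foldl_cons,
      show pvStepB t ([], 0, none) x
        = ([((0, x.1.2.2.2), x)], (0 : Int), some (pvC x)) from rfl,
      pvFoldB t xs _ 0 (pvC x)]
    have htag : [(((0 : Int), x.1.2.2.2), x)] ++ pvTagWith t 0 (pvC x) xs
        = pvTagChunks 0 (pvGo t [x] (pvC x) xs) := by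
      have h := pvTagWith_go t xs [x] (pvC x) 0
      simpa [pvTagRow] using h
    rw [htag, pvSorted2_tagChunks]
    simp [pvChunks]

theorem sort_faces_rowwise_core : ∀ (faces : List ((Int × Int × Int × Int) × String)) (t : Int),
    sort_faces_rowwise faces t = sort_faces_rowwise_alt faces t := by
  intro faces t
  rw [pvA_eq, pvB_eq]

-- ===== VERDICT (by name: the statement is the Claim_ definition above) =====
theorem sort_faces_rowwise_spec : Claim_equal_sort_faces_rowwise := by
  intro faces t _
  exact sort_faces_rowwise_core faces t
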